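-- pv_equiv track=rewrite | github.com/Cycrypto/BOJ | 백준/Bronze/14456. Hoof， Paper， Scissors （Bronze）/Hoof， Paper， Scissors （Bronze）.py | max_wins
-- ===== SOURCE A (Python) =====
-- def max_wins(games):
--   # Create a list of all possible mappings between numbers and gestures
--   mappings = [[1, 2, 3], [1, 3, 2], [2, 1, 3], [2, 3, 1], [3, 1, 2], [3, 2, 1]]
--
--   # Initialize the maximum number of wins to 0
--   max_wins = 0
--
--   # Iterate through all mappings
--   for mapping in mappings:
--     # Initialize the number of wins for the first cow to 0
--     wins = 0
--     # Iterate through all games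
--     for game in games:
--       # If the gesture of the first cow beats the gesture of the second cow according to the current mapping,
--       # increment the number of wins for the first cow
--       if (mapping.index(game[0]) + 1) % 3 == mapping.index(game[1]):
--         wins += 1
--     # Update the maximum number of wins if necessary
--     max_wins = max(max_wins, wins)
--
--   # Return the maximum number of wins
--   return max_wins
-- ===== SOURCE B (Python) =====
-- def max_wins(games):
--     # The win test (mapping.index(a)+1)%3 == mapping.index(b) only says "b follows a
--     # cyclically in the mapping", so it depends only on the mapping's cyclic order.
--     # The six permutations of [1,2,3] fall into exactly two cyclic orders, so one pass
--     # with two counters (one per cyclic order) suffices; their max is the answer.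
--     nxt = {1: 2, 2: 3, 3: 1}
--     forward = backward = 0
--     for game in games:
--         a, b = game[0], game[1]
--         if nxt[a] == b:
--             forward += 1
--         elif nxt[b] == a:
--             backward += 1
--     return max(forward, backward)
-- ===== Notes on version B (the rewrite author's own statement) =====
-- stated objective: faster
-- what changed: A tries all 6 permutations, rescanning the games and calling list.index per game per mapping; B observes the win test only depends on the mapping's cyclic order, of which there are exactly two, so it makes a single pass with two counters (forward/backward cycle via a successor dict) and returns their max, with no permutations at all.
import Mathlib
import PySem

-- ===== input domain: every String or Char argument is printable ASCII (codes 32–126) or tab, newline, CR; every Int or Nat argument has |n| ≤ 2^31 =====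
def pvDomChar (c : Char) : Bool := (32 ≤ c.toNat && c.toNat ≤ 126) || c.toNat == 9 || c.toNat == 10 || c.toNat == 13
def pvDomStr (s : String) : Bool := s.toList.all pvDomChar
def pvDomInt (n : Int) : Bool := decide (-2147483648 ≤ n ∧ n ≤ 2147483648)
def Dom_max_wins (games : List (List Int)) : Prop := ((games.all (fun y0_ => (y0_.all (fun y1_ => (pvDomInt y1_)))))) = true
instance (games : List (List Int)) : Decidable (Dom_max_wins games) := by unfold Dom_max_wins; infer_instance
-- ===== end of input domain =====

-- B replaces A's six permutation passes by ONE pass: the win test only depends on the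
-- mapping's cyclic order, of which there are exactly two, so two counters suffice.

-- ===== PORT A =====
-- A's inner loop body: count a win when (mapping.index(game[0])+1)%3 == mapping.index(game[1])
def stepA (mapping : List Int) (wins : Int) (game : List Int) : Int :=
  match PySem.List.pyGet? game 0, PySem.List.pyGet? game 1 with
  | some a, some b =>
    match PySem.List.index? mapping a, PySem.List.index? mapping b with
    | some ia, some ib => if (ia + 1) % 3 == ib then wins + 1 else wins
    | _, _ => wins
  | _, _ => wins

def max_wins (games : List (List Int)) : Int :=
  [[(1:Int),2,3],[1,3,2],[2,1,3],[2,3,1],[3,1,2],[3,2,1]].foldl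
    (fun mw mapping => max mw (games.foldl (stepA mapping) 0)) 0

-- ===== PORT B =====
-- nxt = {1: 2, 2: 3, 3: 1}, the forward cyclic order 1->2->3->1
def nxt : PySem.Dict Int Int := PySem.Dict.ofList [(1, 2), (2, 3), (3, 1)]

-- B's single loop body: bump the counter of whichever cyclic order the pair wins under;
-- nxt[a] / nxt[b] is a Dict lookup (none = KeyError, outside Pre_)
def stepB (c : Int × Int) (game : List Int) : Int × Int :=
  match PySem.List.pyGet? game 0, PySem.List.pyGet? game 1 with
  | some a, some b =>
    match nxt.get? a with
    | some na =>
      if na == b then (c.1 + 1, c.2)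
      else
        match nxt.get? b with
        | some nb => if nb == a then (c.1, c.2 + 1) else c
        | none => c
    | none => c
  | _, _ => c

def max_wins_alt (games : List (List Int)) : Int :=
  let c := games.foldl stepB (0, 0)
  max c.1 c.2

-- ===== PRECONDITION & SPEC =====
-- Pre_ is exactly where A returns: otherwise A raises IndexError (game shorter than 2)
-- or ValueError (a gesture outside {1,2,3} fails list.index)
def goodGame (g : List Int) : Bool :=
  match g with
  | a :: b :: _ => (a == 1 || a == 2 || a == 3) && (b == 1 || b == 2 || b == 3)
  | _ => false

def Pre_max_wins (games : List (List Int)) : Prop := games.all goodGame = true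
instance (games : List (List Int)) : Decidable (Pre_max_wins games) := by unfold Pre_max_wins; infer_instance
def pvWitness_max_wins : List (List Int) := [[1, 2], [2, 3], [3, 3], [1, 1]]

def Spec_max_wins (games : List (List Int)) (out : Int) : Prop := out = max_wins_alt games
instance (games : List (List Int)) (out : Int) : Decidable (Spec_max_wins games out) := by unfold Spec_max_wins; infer_instance

-- ===== CLAIM (what is proved, stated in full; the proofs are below) =====
def Claim_equal_max_wins : Prop := ∀ (games : List (List Int)), Dom_max_wins games → Pre_max_wins games → Spec_max_wins games (max_wins games)

-- ===== LEMMAS AND PROOFS =====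

-- the ordered pair (game[0], game[1]) of a good game
def keyOf (g : List Int) : Int × Int := (g.headD 0, g.tail.headD 0)

-- the two cyclic-order win sets, used only by the proofs
def inFwd (k : Int × Int) : Bool := k == (1,2) || k == (2,3) || k == (3,1)
def inBwd (k : Int × Int) : Bool := k == (1,3) || k == (3,2) || k == (2,1)

-- the win predicate of A, as a function of the pair
def winsP (m : List Int) (k : Int × Int) : Bool :=
  match PySem.List.index? m k.1, PySem.List.index? m k.2 with
  | some ia, some ib => (ia + 1) % 3 == ib
  | _, _ => false

theorem pyGet0 (a b : Int) (t : List Int) : PySem.List.pyGet? (a :: b :: t) 0 = some a := by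
  simp [PySem.List.pyGet?, PySem.List.pyIdx?]
  rw [if_pos (by positivity)]
  simp

theorem pyGet1 (a b : Int) (t : List Int) : PySem.List.pyGet? (a :: b :: t) 1 = some b := by
  simp [PySem.List.pyGet?, PySem.List.pyIdx?]

-- on good pairs, each mapping's win predicate is one of the two cyclic-order tests
theorem winsP_class (a b : Int)
    (ha : a = 1 ∨ a = 2 ∨ a = 3) (hb : b = 1 ∨ b = 2 ∨ b = 3) :
    winsP [1,2,3] (a,b) = inFwd (a,b) ∧ winsP [2,3,1] (a,b) = inFwd (a,b) ∧
    winsP [3,1,2] (a,b) = inFwd (a,b) ∧ winsP [1,3,2] (a,b) = inBwd (a,b) ∧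
    winsP [3,2,1] (a,b) = inBwd (a,b) ∧ winsP [2,1,3] (a,b) = inBwd (a,b) := by
  rcases ha with rfl | rfl | rfl <;> rcases hb with rfl | rfl | rfl <;> decide

theorem index_some (m : List Int) (h1 : (1:Int) ∈ m) (h2 : (2:Int) ∈ m) (h3 : (3:Int) ∈ m) :
    ∀ v : Int, (v = 1 ∨ v = 2 ∨ v = 3) → (PySem.List.index? m v).isSome = true := by
  intro v hv
  rcases hv with rfl | rfl | rfl <;> simp [h1, h2, h3]

theorem A_inner (m : List Int)
    (hm : ∀ v : Int, (v = 1 ∨ v = 2 ∨ v = 3) → (PySem.List.index? m v).isSome = true)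
    (games : List (List Int))
    (h : ∀ g ∈ games, goodGame g = true) (w : Int) :
    games.foldl (stepA m) w = w + ((games.map keyOf).countP (winsP m) : Int) := by
  induction games generalizing w with
  | nil => simp
  | cons g t ih =>
    have hg := h g (by simp)
    rcases g with _ | ⟨a, _ | ⟨b, t'⟩⟩
    · simp [goodGame] at hg
    · simp [goodGame] at hg
    · simp only [goodGame, Bool.and_eq_true, Bool.or_eq_true, beq_iff_eq] at hg
      obtain ⟨ha, hb⟩ := hg
      obtain ⟨ia, hia⟩ := Option.isSome_iff_exists.mp (hm a (by tauto))
      obtain ⟨ib, hib⟩ := Option.isSome_iff_exists.mp (hm b (by tauto))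
      have hstep : stepA m w (a :: b :: t') =
          if winsP m (a, b) then w + 1 else w := by
        simp only [stepA, winsP, pyGet0, pyGet1, hia, hib]
      simp only [List.foldl_cons, List.map_cons, hstep,
        List.countP_cons, show keyOf (a :: b :: t') = (a, b) from rfl]
      have iht := fun w' => ih (fun g hg' => h g (List.mem_cons_of_mem _ hg')) (w := w')
      by_cases hw : winsP m (a, b) = true
      · rw [if_pos hw, iht (w + 1)]; simp [hw]; ring
      · rw [if_neg hw, iht w]; simp [hw]

theorem B_fold (games : List (List Int)) (h : ∀ g ∈ games, goodGame g = true)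
    (c1 c2 : Int) :
    games.foldl stepB (c1, c2)
      = (c1 + ((games.map keyOf).countP inFwd : Int),
         c2 + ((games.map keyOf).countP inBwd : Int)) := by
  induction games generalizing c1 c2 with
  | nil => simp
  | cons g t ih =>
    have hg := h g (by simp)
    rcases g with _ | ⟨a, _ | ⟨b, t'⟩⟩
    · simp [goodGame] at hg
    · simp [goodGame] at hg
    · simp only [goodGame, Bool.and_eq_true, Bool.or_eq_true, beq_iff_eq] at hg
      obtain ⟨ha, hb⟩ := hg
      have hstep : stepB (c1, c2) (a :: b :: t') =
          if inFwd (a, b) then (c1 + 1, c2)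
          else if inBwd (a, b) then (c1, c2 + 1) else (c1, c2) := by
        simp only [stepB, pyGet0, pyGet1]
        rcases ha with (rfl | rfl) | rfl <;> rcases hb with (rfl | rfl) | rfl <;> rfl
      have iht := fun x y => ih (fun g hg' => h g (List.mem_cons_of_mem _ hg')) (c1 := x) (c2 := y)
      have hdisj : ¬(inFwd (a, b) = true ∧ inBwd (a, b) = true) := by
        rintro ⟨h1, h2⟩
        simp only [inFwd, inBwd, Bool.or_eq_true, beq_iff_eq, Prod.mk.injEq] at h1 h2
        omega
      simp only [List.foldl_cons, List.map_cons, hstep,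
        List.countP_cons, show keyOf (a :: b :: t') = (a, b) from rfl]
      by_cases h1 : inFwd (a, b) = true
      · have h2 : inBwd (a, b) = false := by
          cases hb : inBwd (a, b) with
          | false => rfl
          | true => exact absurd ⟨h1, hb⟩ hdisj
        rw [if_pos h1, iht (c1 + 1) c2]
        simp [h1, h2]
        omega
      · rw [if_neg h1, ]
        by_cases h2 : inBwd (a, b) = true
        · rw [if_pos h2, iht c1 (c2 + 1)]
          simp only [Bool.not_eq_true] at h1
          simp [h1, h2]
          omega
        · simp only [Bool.not_eq_true] at h1 h2
          rw [if_neg (by simp [h2]), iht c1 c2]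
          simp [h1, h2]

theorem countP_class (games : List (List Int)) (h : ∀ g ∈ games, goodGame g = true)
    (m : List Int) (q : Int × Int → Bool)
    (hq : ∀ a b, (a = 1 ∨ a = 2 ∨ a = 3) → (b = 1 ∨ b = 2 ∨ b = 3) →
            winsP m (a, b) = q (a, b)) :
    (games.map keyOf).countP (winsP m) = (games.map keyOf).countP q := by
  apply List.countP_congr
  intro k hk
  obtain ⟨g, hg, rfl⟩ := List.mem_map.mp hk
  have hgg := h g hg
  rcases g with _ | ⟨a, _ | ⟨b, t'⟩⟩
  · simp [goodGame] at hgg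
  · simp [goodGame] at hgg
  · simp only [goodGame, Bool.and_eq_true, Bool.or_eq_true, beq_iff_eq] at hgg
    have ha : a = 1 ∨ a = 2 ∨ a = 3 := by rcases hgg.1 with (h' | h') | h' <;> tauto
    have hb : b = 1 ∨ b = 2 ∨ b = 3 := by rcases hgg.2 with (h' | h') | h' <;> tauto
    have : keyOf (a :: b :: t') = (a, b) := rfl
    rw [this, hq a b ha hb]

-- ===== VERDICT (by name: the statement is the Claim_ definition above) =====
theorem max_wins_spec : Claim_equal_max_wins := by
  intro games hdom hpre
  unfold Spec_max_wins max_wins max_wins_alt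
  have h : ∀ g ∈ games, goodGame g = true := by
    unfold Pre_max_wins at hpre
    simpa [List.all_eq_true] using hpre
  have hcls := fun a b ha hb => winsP_class a b ha hb
  simp only [List.foldl_cons, List.foldl_nil]
  rw [A_inner [1,2,3] (index_some _ (by decide) (by decide) (by decide)) games h, A_inner [1,3,2] (index_some _ (by decide) (by decide) (by decide)) games h, A_inner [2,1,3] (index_some _ (by decide) (by decide) (by decide)) games h,
      A_inner [2,3,1] (index_some _ (by decide) (by decide) (by decide)) games h, A_inner [3,1,2] (index_some _ (by decide) (by decide) (by decide)) games h, A_inner [3,2,1] (index_some _ (by decide) (by decide) (by decide)) games h,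
      B_fold games h,
      countP_class games h [1,2,3] inFwd (fun a b ha hb => (hcls a b ha hb).1),
      countP_class games h [2,3,1] inFwd (fun a b ha hb => (hcls a b ha hb).2.1),
      countP_class games h [3,1,2] inFwd (fun a b ha hb => (hcls a b ha hb).2.2.1),
      countP_class games h [1,3,2] inBwd (fun a b ha hb => (hcls a b ha hb).2.2.2.1),
      countP_class games h [3,2,1] inBwd (fun a b ha hb => (hcls a b ha hb).2.2.2.2.1),
      countP_class games h [2,1,3] inBwd (fun a b ha hb => (hcls a b ha hb).2.2.2.2.2)]
  omega
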